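-- pv_equiv track=rewrite | github.com/WHJWNAVY/py_tools | py_img_to_excel.py | base26_to_dec
-- ===== SOURCE A (Python) =====
-- def base26_to_dec(s):
--     d = 0
--     j = 1
--     st = s.upper()
--     for x in range(0, len(st))[::-1]:
--         c = ord(st[x])
--         if c < 65 and c > 90:
--             return 0
--         d += (c - 64) * j
--         j *= 26
--     return d
-- ===== SOURCE B (Python) =====
-- def base26_to_dec(s):
--     d = 0
--     for ch in s.upper():
--         d = d * 26 + (ord(ch) - 64)
--     return d
-- ===== Notes on version B (the rewrite author's own statement) =====
-- stated objective: simpler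
-- what changed: Replaces the right-to-left loop over reversed indices with an explicit power-of-26 accumulator by a left-to-right Horner fold (d = d*26 + digit), dropping the index list, the power variable and the unreachable validation branch.
import Mathlib
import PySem

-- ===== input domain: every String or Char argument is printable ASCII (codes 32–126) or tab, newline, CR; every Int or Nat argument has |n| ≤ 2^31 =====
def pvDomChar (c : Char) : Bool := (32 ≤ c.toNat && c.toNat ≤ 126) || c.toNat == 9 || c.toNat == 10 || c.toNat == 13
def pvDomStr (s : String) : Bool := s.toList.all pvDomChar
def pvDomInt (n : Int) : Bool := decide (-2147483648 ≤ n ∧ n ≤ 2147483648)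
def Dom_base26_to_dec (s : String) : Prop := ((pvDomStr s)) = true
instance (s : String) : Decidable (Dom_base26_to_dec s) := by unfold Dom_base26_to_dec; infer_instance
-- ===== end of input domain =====

-- B replaces A's reversed-index loop with power accumulator by a left-to-right Horner fold (objective: simpler).

-- ===== PORT A =====
-- the loop body: x runs over range(0, len(st))[::-1]; state (d, j); the early
-- 'return 0' branch is kept verbatim (its condition c < 65 and c > 90 is Python's).
def pvAGo (st : String) : List Int → Int → Int → Int
  | [], d, _ => d
  | x :: xs, d, j =>
    -- c = ord(st[x]); every x produced by range(0, len(st)) is in range, so the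
    -- IndexError case of pyGet? is unreachable and the default 0 is never used
    let c : Int := ((PySem.Str.pyGet? st x).map (fun ch => (ch.toNat : Int))).getD 0
    if c < 65 ∧ c > 90 then 0
    else pvAGo st xs (d + (c - 64) * j) (j * 26)

def base26_to_dec (s : String) : Int :=
  let st := PySem.Str.upper s
  -- range(0, len(st))[::-1]: slice? with step -1 never returns none
  pvAGo st ((PySem.List.slice? (PySem.List.pyRange 0 (PySem.Str.len st) 1) none none (-1)).getD []) 0 1

-- ===== PORT B =====
def pvBGo : List Char → Int → Int
  | [], d => d
  | ch :: cs, d => pvBGo cs (d * 26 + ((ch.toNat : Int) - 64))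

def base26_to_dec_alt (s : String) : Int :=
  pvBGo (PySem.Str.upper s).toList 0

-- ===== PRECONDITION & SPEC =====
def Spec_base26_to_dec (s : String) (out : Int) : Prop := out = base26_to_dec_alt s
instance (s : String) (out : Int) : Decidable (Spec_base26_to_dec s out) := by unfold Spec_base26_to_dec; infer_instance

-- ===== CLAIM (what is proved, stated in full; the proofs are below) =====
def Claim_equal_base26_to_dec : Prop := ∀ (s : String), Dom_base26_to_dec s → Spec_base26_to_dec s (base26_to_dec s)

-- ===== LEMMAS AND PROOFS =====

theorem pvBGo_append (xs ys : List Char) (d : Int) :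
    pvBGo (xs ++ ys) d = pvBGo ys (pvBGo xs d) := by
  induction xs generalizing d with
  | nil => rfl
  | cons c cs ih => simp [pvBGo, ih]

theorem pvAGo_eq (st : String) (k : Nat) (hk : k ≤ st.toList.length) (d j : Int) :
    pvAGo st ((PySem.List.pyRange 0 (k : Int) 1).reverse) d j
      = d + j * pvBGo (st.toList.take k) 0 := by
  induction k generalizing d j with
  | zero => simp [PySem.List.pyRange, pvAGo, pvBGo]
  | succ k ih =>
    have hk' : k ≤ st.toList.length := Nat.le_of_succ_le hk
    have hlt : k < st.toList.length := hk
    have hrange : PySem.List.pyRange 0 ((k + 1 : Nat) : Int) 1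
        = PySem.List.pyRange 0 (k : Int) 1 ++ [(k : Int)] := by
      push_cast
      exact PySem.List.pyRange_one_succ_right (by omega)
    rw [hrange, List.reverse_append]
    simp only [List.reverse_singleton, List.singleton_append, pvAGo]
    have hget : PySem.Str.pyGet? st (k : Int) = some (st.toList[k]'hlt) := by
      simp [List.getElem?_eq_getElem hlt]
    rw [hget]
    simp only [Option.map_some, Option.getD_some]
    rw [if_neg (by omega)]
    rw [ih hk']
    rw [List.take_add_one, List.getElem?_eq_getElem hlt]
    simp only [Option.toList_some, pvBGo_append, pvBGo]
    ring

theorem base26_to_dec_eq_alt (s : String) : base26_to_dec s = base26_to_dec_alt s := by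
  unfold base26_to_dec base26_to_dec_alt
  simp only [PySem.List.slice?_none_none_neg_one, Option.getD_some]
  have hlen : PySem.Str.len (PySem.Str.upper s) = ((PySem.Str.upper s).toList.length : Int) := by
    simp [PySem.Str.len_eq]
  rw [hlen, pvAGo_eq (PySem.Str.upper s) (PySem.Str.upper s).toList.length le_rfl 0 1]
  simp

-- ===== VERDICT (by name: the statement is the Claim_ definition above) =====
theorem base26_to_dec_spec : Claim_equal_base26_to_dec := by
  intro s _
  exact base26_to_dec_eq_alt s
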